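-- pv_equiv track=rewrite | github.com/Cenkard/PacketAnalyser | Walter/pa.py | DHCPoptionPad
-- ===== SOURCE A (Python) =====
-- def DHCPoptionPad(options, j):
-- 	i = j
-- 	op = ["Padding: ", ""]
-- 	FinOp = len(options)-1
-- 	while (i<=FinOp):
-- 		op[0] = op[0]+"00"
-- 		i = i+2
-- 	return i, op
-- ===== SOURCE B (Python) =====
-- def DHCPoptionPad(options, j):
--     FinOp = len(options) - 1
--     count = (FinOp - j) // 2 + 1 if j <= FinOp else 0
--     return j + 2 * count, ["Padding: " + "00" * count, ""]
-- ===== Notes on version B (the rewrite author's own statement) =====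
-- stated objective: simpler
-- what changed: Replaces the while loop that appends '00' and advances the index by 2 per iteration with a closed-form count ((FinOp - j)//2 + 1 when j <= FinOp, else 0): the returned index is pure arithmetic and the padding string is built by one repetition.
import Mathlib
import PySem

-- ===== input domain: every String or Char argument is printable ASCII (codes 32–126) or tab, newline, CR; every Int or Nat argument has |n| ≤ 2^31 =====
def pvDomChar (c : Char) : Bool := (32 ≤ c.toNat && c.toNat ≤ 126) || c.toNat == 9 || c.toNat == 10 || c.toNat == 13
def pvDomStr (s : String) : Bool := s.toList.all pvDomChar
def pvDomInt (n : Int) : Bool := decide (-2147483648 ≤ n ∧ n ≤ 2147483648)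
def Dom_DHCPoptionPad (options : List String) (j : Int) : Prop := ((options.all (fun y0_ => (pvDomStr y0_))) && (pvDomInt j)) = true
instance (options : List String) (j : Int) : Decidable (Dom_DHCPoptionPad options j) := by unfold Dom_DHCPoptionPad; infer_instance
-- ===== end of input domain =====

-- B replaces A's while loop with a closed-form chunk count; objective: simpler.

-- ===== PORT A =====
-- the while loop: i advances by 2 and "00" is appended while i <= FinOp
def pvPadLoop (FinOp : Int) (i : Int) (s : String) : Int × String :=
  if i ≤ FinOp then pvPadLoop FinOp (i + 2) (s ++ "00") else (i, s)
termination_by (FinOp + 1 - i).toNat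
decreasing_by omega

def DHCPoptionPad (options : List String) (j : Int) : Int × List String :=
  let FinOp : Int := (options.length : Int) - 1
  let r := pvPadLoop FinOp j "Padding: "
  (r.1, [r.2, ""])

-- ===== PORT B =====
-- hand port of Python's string repetition  s * n  (n copies of s); exact for n ≥ 0
def pvStrRepeat (s : String) : Nat → String
  | 0 => ""
  | n + 1 => s ++ pvStrRepeat s n

def DHCPoptionPad_alt (options : List String) (j : Int) : Int × List String :=
  let FinOp : Int := (options.length : Int) - 1
  let count : Int := if j ≤ FinOp then PySem.Int.floordiv (FinOp - j) 2 + 1 else 0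
  (j + 2 * count, ["Padding: " ++ pvStrRepeat "00" count.toNat, ""])

-- ===== PRECONDITION & SPEC =====
def Spec_DHCPoptionPad (options : List String) (j : Int) (out : Int × List String) : Prop := out = DHCPoptionPad_alt options j
instance (options : List String) (j : Int) (out : Int × List String) : Decidable (Spec_DHCPoptionPad options j out) := by unfold Spec_DHCPoptionPad; infer_instance

-- ===== CLAIM (what is proved, stated in full; the proofs are below) =====
def Claim_equal_DHCPoptionPad : Prop := ∀ (options : List String) (j : Int), Dom_DHCPoptionPad options j → Spec_DHCPoptionPad options j (DHCPoptionPad options j)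

-- ===== LEMMAS AND PROOFS =====

-- number of loop iterations of A, as a Nat
def pvCnt (FinOp i : Int) : Nat := if i ≤ FinOp then ((FinOp - i) / 2).toNat + 1 else 0

lemma pvCnt_step (FinOp i : Int) (h : i ≤ FinOp) :
    pvCnt FinOp i = pvCnt FinOp (i + 2) + 1 := by
  unfold pvCnt
  split_ifs <;> omega

lemma pvPadLoop_spec (FinOp i : Int) (s : String) :
    pvPadLoop FinOp i s = (i + 2 * (pvCnt FinOp i : Int), s ++ pvStrRepeat "00" (pvCnt FinOp i)) := by
  induction i, s using pvPadLoop.induct (FinOp := FinOp) with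
  | case1 i s h ih =>
    rw [pvPadLoop, if_pos h, ih, pvCnt_step FinOp i h]
    refine Prod.ext ?_ ?_
    · push_cast; ring_nf
    · show (s ++ "00") ++ pvStrRepeat "00" (pvCnt FinOp (i + 2))
        = s ++ pvStrRepeat "00" (pvCnt FinOp (i + 2) + 1)
      rw [pvStrRepeat]
      exact String.append_assoc
  | case2 i s h =>
    rw [pvPadLoop, if_neg h]
    simp [pvCnt, if_neg h, pvStrRepeat]

-- ===== VERDICT (by name: the statement is the Claim_ definition above) =====
theorem DHCPoptionPad_spec : Claim_equal_DHCPoptionPad := by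
  intro options j _
  show DHCPoptionPad options j = DHCPoptionPad_alt options j
  simp only [DHCPoptionPad, DHCPoptionPad_alt]
  rw [pvPadLoop_spec]
  set FinOp : Int := (options.length : Int) - 1 with hF
  have hcount : (if j ≤ FinOp then PySem.Int.floordiv (FinOp - j) 2 + 1 else 0)
      = (pvCnt FinOp j : Int) := by
    unfold pvCnt
    split_ifs with h
    · rw [PySem.Int.floordiv_eq_ediv_of_pos (by omega)]
      omega
    · simp
  simp only [hcount, Int.toNat_natCast]
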